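-- pv_equiv track=rewrite | github.com/devhoonse/coding_test | 06_sorting/06_03.py | get_maximum_with_k_swap
-- ===== SOURCE A (Python) =====
-- def get_maximum_with_k_swap(array_a, array_b, k):
--     """
--     배열 A 에서 최대 k 개 아이템을 배열 B 와 교환하여
--     만들 수 있는 배열 A 원소 합계의 최대값을 구하는 문제입니다.
--
--     >>> get_maximum_with_k_swap([1, 2, 5, 4, 3], [5, 5, 6, 6, 5], 3)
--     26
--
--     :param array_a: 주어진 배열 A
--     :type array_a: List[int]
--     :param array_b: 주어진 배열 B
--     :type array_b: List[int]
--     :param k: 교환 가능한 횟수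
--     :type k: int
--     :return: k 회 교환해서 만들 수 있는 배열 A 원소 합계의 최대값
--     :rtype: int
--     """
--
--     # 각 배열들을 정렬합니다.
--     array_a.sort()
--     array_b.sort(reverse=True)
--
--     # array_a 에서는 크기가
--     swap_count = 0
--     for i in range(k):
--         if array_a[i] < array_b[swap_count]:
--             array_a[i], array_b[swap_count] = array_b[swap_count], array_a[i]
--             swap_count += 1
--
--     # 정답 값을 반환합니다.
--     return sum(array_a)
-- ===== SOURCE B (Python) =====
-- def get_maximum_with_k_swap(array_a, array_b, k):
--     m = min(max(k, 0), len(array_b))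
--     pool = array_a + sorted(array_b)[len(array_b) - m:]
--     pool.sort()
--     return sum(pool[len(pool) - len(array_a):])
-- ===== Notes on version B (the rewrite author's own statement) =====
-- stated objective: alternative
-- what changed: A simulates the greedy pairwise swaps (sort both arrays oppositely, swap beneficial pairs in place with a swap counter, re-sum); B does no pairwise comparison at all: it pools array_a with the k largest elements of array_b and returns the sum of the len(array_a) largest elements of that pool.
-- outside the precondition, e.g. on get_maximum_with_k_swap([9, 9], [1], 2): A returns 18, B returns 18
import Mathlib
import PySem

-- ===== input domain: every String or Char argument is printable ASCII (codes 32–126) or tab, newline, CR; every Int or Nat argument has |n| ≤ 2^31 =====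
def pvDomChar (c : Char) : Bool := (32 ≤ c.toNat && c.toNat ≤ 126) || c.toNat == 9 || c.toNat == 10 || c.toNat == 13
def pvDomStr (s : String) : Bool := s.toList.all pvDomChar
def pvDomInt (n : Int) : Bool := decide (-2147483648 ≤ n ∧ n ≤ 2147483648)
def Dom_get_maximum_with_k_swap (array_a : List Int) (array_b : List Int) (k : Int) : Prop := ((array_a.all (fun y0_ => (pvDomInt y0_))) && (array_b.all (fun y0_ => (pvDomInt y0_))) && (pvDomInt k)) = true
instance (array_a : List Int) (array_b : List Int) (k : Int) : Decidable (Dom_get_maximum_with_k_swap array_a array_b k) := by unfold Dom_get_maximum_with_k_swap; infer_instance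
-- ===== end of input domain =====

-- B replaces A's pairwise greedy swap simulation by pooling array_a with the k largest of array_b
-- and summing the len(array_a) largest of the pool (objective: alternative algorithm).
-- Note: Python A sorts both argument lists and swaps into them IN PLACE; B does not mutate — the
-- equivalence proved here is about the RETURN value only.

-- ===== PORT A =====
def get_maximum_with_k_swap (array_a : List Int) (array_b : List Int) (k : Int) : Int :=
  let a0 := PySem.List.sorted array_a (fun x => x) false
  let b0 := PySem.List.sorted array_b (fun x => x) true
  -- for i in range(k): if a[i] < b[sc]: swap a[i], b[sc]; sc += 1   (state = (a, b, sc))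
  let res := (PySem.List.pyRange 0 k 1).foldl
    (fun (st : List Int × List Int × Int) i =>
      if PySem.List.pyGetD st.1 i 0 < PySem.List.pyGetD st.2.1 st.2.2 0 then
        (PySem.List.pySetD st.1 i (PySem.List.pyGetD st.2.1 st.2.2 0),
         PySem.List.pySetD st.2.1 st.2.2 (PySem.List.pyGetD st.1 i 0),
         st.2.2 + 1)
      else st)
    (a0, b0, (0 : Int))
  res.1.sum

-- ===== PORT B =====
def get_maximum_with_k_swap_alt (array_a : List Int) (array_b : List Int) (k : Int) : Int :=
  let m := min (max k 0) (PySem.List.len array_b)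
  let pool := array_a ++
    PySem.List.slice (PySem.List.sorted array_b (fun x => x) false)
      (some (PySem.List.len array_b - m)) none
  let spool := PySem.List.sorted pool (fun x => x) false
  (PySem.List.slice spool (some (PySem.List.len spool - PySem.List.len array_a)) none).sum

-- ===== PRECONDITION & SPEC =====
-- Pre_ excludes k larger than either list's length: there A's loop may raise IndexError depending on
-- the data (when the swaps happen to stop early A still returns, a value B matches anyway).
def Pre_get_maximum_with_k_swap (array_a : List Int) (array_b : List Int) (k : Int) : Prop :=
  k ≤ (array_a.length : Int) ∧ k ≤ (array_b.length : Int)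
instance (array_a : List Int) (array_b : List Int) (k : Int) : Decidable (Pre_get_maximum_with_k_swap array_a array_b k) := by unfold Pre_get_maximum_with_k_swap; infer_instance

def pvWitness_get_maximum_with_k_swap : List Int × List Int × Int := ([1, 2, 5, 4, 3], [5, 5, 6, 6, 5], 3)

def Spec_get_maximum_with_k_swap (array_a : List Int) (array_b : List Int) (k : Int) (out : Int) : Prop := out = get_maximum_with_k_swap_alt array_a array_b k
instance (array_a : List Int) (array_b : List Int) (k : Int) (out : Int) : Decidable (Spec_get_maximum_with_k_swap array_a array_b k out) := by unfold Spec_get_maximum_with_k_swap; infer_instance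

-- ===== CLAIM (what is proved, stated in full; the proofs are below) =====
def Claim_equal_get_maximum_with_k_swap : Prop := ∀ (array_a : List Int) (array_b : List Int) (k : Int), Dom_get_maximum_with_k_swap array_a array_b k → Pre_get_maximum_with_k_swap array_a array_b k → Spec_get_maximum_with_k_swap array_a array_b k (get_maximum_with_k_swap array_a array_b k)

-- ===== LEMMAS AND PROOFS =====

-- length of the prefix of beneficial swaps after j loop iterations (= A's swap_count)
def pvPfx (sa sb : List Int) : Nat → Nat
  | 0 => 0
  | j + 1 => if pvPfx sa sb j = j ∧ sa.getD j 0 < sb.getD j 0 then j + 1 else pvPfx sa sb j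

theorem pvPfx_le (sa sb : List Int) : ∀ j, pvPfx sa sb j ≤ j := by
  intro j
  induction j with
  | zero => simp [pvPfx]
  | succ j ih => unfold pvPfx; split <;> omega

theorem pvPfx_lt_elem (sa sb : List Int) : ∀ j, ∀ i < pvPfx sa sb j, sa.getD i 0 < sb.getD i 0 := by
  intro j
  induction j with
  | zero => simp [pvPfx]
  | succ j ih =>
    unfold pvPfx
    split
    · rename_i h
      intro i hi
      rcases Nat.lt_succ_iff_lt_or_eq.mp hi with hi' | hi'
      · exact ih i (by rw [h.1]; exact hi')
      · subst hi'; exact h.2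
    · exact ih

theorem pvPfx_stop (sa sb : List Int) : ∀ j, pvPfx sa sb j ≠ j →
    ¬ sa.getD (pvPfx sa sb j) 0 < sb.getD (pvPfx sa sb j) 0 := by
  intro j
  induction j with
  | zero => simp [pvPfx]
  | succ j ih =>
    unfold pvPfx
    split
    · intro h; omega
    · rename_i hcond
      intro _
      by_cases hj : pvPfx sa sb j = j
      · intro hlt; exact hcond ⟨hj, hj ▸ hlt⟩
      · exact ih hj

theorem pvGetD_eq (l : List Int) (n : Nat) (h : n < l.length) : l.getD n 0 = l[n] := by
  simp [List.getD_eq_getElem?_getD, List.getElem?_eq_getElem h]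

theorem pvGetD_right (ys xs : List Int) (c j : Nat) (hcy : c ≤ ys.length) (hcj : c ≤ j) :
    (ys.take c ++ xs.drop c).getD j 0 = xs.getD j 0 := by
  have hlen : (ys.take c).length = c := by rw [List.length_take]; omega
  rw [List.getD_eq_getElem?_getD, List.getD_eq_getElem?_getD,
      List.getElem?_append_right (by rw [hlen]; omega), hlen, List.getElem?_drop]
  congr 2
  omega

theorem pvSet_mid (ys xs : List Int) (j : Nat) (hx : j < xs.length) (hy : j < ys.length) :
    (ys.take j ++ xs.drop j).set j (ys.getD j 0) = ys.take (j + 1) ++ xs.drop (j + 1) := by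
  have hlen : (ys.take j).length = j := by rw [List.length_take]; omega
  have hgd : ys.getD j 0 = ys[j] := by
    simp [List.getD_eq_getElem?_getD, List.getElem?_eq_getElem hy]
  rw [List.drop_eq_getElem_cons hx, List.set_append, if_neg (by omega), hlen, Nat.sub_self,
      List.set_cons_zero, hgd, ← List.take_append_getElem hy, List.append_assoc]
  rfl

-- sum of the first c pairwise differences
theorem pvSumDelta (xs ys : List Int) : ∀ c, c ≤ xs.length → c ≤ ys.length →
    ((List.range c).map (fun i => ys.getD i 0 - xs.getD i 0)).sum
      = (ys.take c).sum - (xs.take c).sum := by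
  intro c
  induction c with
  | zero => simp
  | succ c ih =>
    intro hx hy
    have hxc : c < xs.length := by omega
    have hyc : c < ys.length := by omega
    rw [List.range_succ, List.map_append, List.sum_append, ih (by omega) (by omega),
        ← List.take_append_getElem hxc, ← List.take_append_getElem hyc,
        List.sum_append, List.sum_append]
    simp [List.getD_eq_getElem?_getD, List.getElem?_eq_getElem hxc, List.getElem?_eq_getElem hyc]
    ring

-- a sum of 'if i < c then f i else 0' over range K collapses to range c
theorem pvSumIte (f : Nat → Int) : ∀ K c, c ≤ K →
    ((List.range K).map (fun i => if i < c then f i else 0)).sum = ((List.range c).map f).sum := by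
  intro K
  induction K with
  | zero => intro c hc; interval_cases c; simp
  | succ K ih =>
    intro c hc
    by_cases hcK : c ≤ K
    · rw [List.range_succ, List.map_append, List.sum_append, ih c hcK]
      simp [show ¬ K < c by omega]
    · have hc' : c = K + 1 := by omega
      subst hc'
      apply congrArg
      apply List.map_congr_left
      intro i hi
      simp only [List.mem_range] at hi
      simp [hi]

-- the loop invariant: after j iterations the state is the swapped prefixes, with swap_count = pvPfx j
theorem pvLoopInv (sa sb : List Int)
    (hmona : ∀ p q : Nat, p ≤ q → q < sa.length → sa.getD p 0 ≤ sa.getD q 0) :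
    ∀ j, j ≤ sa.length → j ≤ sb.length →
    ((List.range j).map (fun (i : Nat) => (i : Int))).foldl
      (fun (st : List Int × List Int × Int) i =>
        if PySem.List.pyGetD st.1 i 0 < PySem.List.pyGetD st.2.1 st.2.2 0 then
          (PySem.List.pySetD st.1 i (PySem.List.pyGetD st.2.1 st.2.2 0),
           PySem.List.pySetD st.2.1 st.2.2 (PySem.List.pyGetD st.1 i 0),
           st.2.2 + 1)
        else st)
      (sa, sb, (0 : Int))
    = (sb.take (pvPfx sa sb j) ++ sa.drop (pvPfx sa sb j),
       sa.take (pvPfx sa sb j) ++ sb.drop (pvPfx sa sb j),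
       ((pvPfx sa sb j : Nat) : Int)) := by
  intro j
  induction j with
  | zero => intro _ _; simp [pvPfx]
  | succ j ih =>
    intro hja hjb
    have hja' : j < sa.length := by omega
    have hjb' : j < sb.length := by omega
    obtain ⟨c, hc⟩ : ∃ c, pvPfx sa sb j = c := ⟨_, rfl⟩
    have hc_le : c ≤ j := hc ▸ pvPfx_le sa sb j
    have hsucc : pvPfx sa sb (j + 1) = if c = j ∧ sa.getD j 0 < sb.getD j 0 then j + 1 else c := by
      unfold pvPfx; rw [hc]
    rw [List.range_succ]
    simp only [List.map_append, List.map_cons, List.map_nil, List.foldl_append,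
               List.foldl_cons, List.foldl_nil]
    rw [ih (by omega) (by omega), hc, hsucc]
    have hga : PySem.List.pyGetD (sb.take c ++ sa.drop c) ((j : Nat) : Int) 0 = sa.getD j 0 := by
      rw [PySem.List.pyGetD_natCast]
      exact pvGetD_right sb sa c j (by omega) hc_le
    have hgb : PySem.List.pyGetD (sa.take c ++ sb.drop c) ((c : Nat) : Int) 0 = sb.getD c 0 := by
      rw [PySem.List.pyGetD_natCast]
      exact pvGetD_right sa sb c c (by omega) le_rfl
    simp only [hga, hgb]
    by_cases hcj : c = j
    · subst hcj
      by_cases hlt : sa.getD c 0 < sb.getD c 0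
      · rw [if_pos hlt, if_pos ⟨rfl, hlt⟩]
        simp only [PySem.List.pySetD_natCast]
        rw [pvSet_mid sb sa c hja' hjb', pvSet_mid sa sb c hjb' hja']
        simp
      · rw [if_neg hlt, if_neg (fun h => hlt h.2)]
    · have hclt : c < j := by omega
      have hstop : ¬ sa.getD c 0 < sb.getD c 0 := hc ▸ pvPfx_stop sa sb j (by omega)
      have hnlt : ¬ sa.getD j 0 < sb.getD c 0 := by
        have h1 : sa.getD c 0 ≤ sa.getD j 0 := hmona c j (by omega) hja'
        omega
      rw [if_neg hnlt, if_neg (fun h => hcj h.1)]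

-- (range K).map (getD ·) is the K-prefix
theorem pvMapRangeGetD (xs : List Int) : ∀ K, K ≤ xs.length →
    (List.range K).map (fun i => xs.getD i 0) = xs.take K := by
  intro K
  induction K with
  | zero => simp
  | succ K ih =>
    intro h
    have hK : K < xs.length := by omega
    rw [List.range_succ, List.map_append, ih (by omega), List.map_cons, List.map_nil,
        ← List.take_append_getElem hK, pvGetD_eq xs K hK]

-- sums distribute over a pointwise sum of maps
theorem pvSumMapAdd (f g : Nat → Int) (l : List Nat) :
    (l.map (fun i => f i + g i)).sum = (l.map f).sum + (l.map g).sum := by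
  induction l with
  | nil => simp
  | cons x t ih => simp [ih]; ring

-- the mins and maxes of K pairs are a rearrangement of the 2K pair components
theorem pvPairPerm (f g : Nat → Int) : ∀ K,
    ((List.range K).map (fun i => min (f i) (g i)) ++
     (List.range K).map (fun i => max (f i) (g i))).Perm
    ((List.range K).map f ++ (List.range K).map g) := by
  intro K
  induction K with
  | zero => simp
  | succ K ih =>
    rw [← Multiset.coe_eq_coe] at *
    simp only [List.range_succ, List.map_append, List.map_cons, List.map_nil,
               ← Multiset.coe_add] at *
    have hpair : (↑[min (f K) (g K)] : Multiset Int) + ↑[max (f K) (g K)]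
        = (↑[f K] : Multiset Int) + ↑[g K] := by
      rcases le_total (f K) (g K) with h | h
      · rw [min_eq_left h, max_eq_right h]
      · rw [min_eq_right h, max_eq_left h]
        exact add_comm _ _
    calc ((List.range K).map (fun i => min (f i) (g i)) : Multiset Int) + ↑[min (f K) (g K)]
            + (↑((List.range K).map (fun i => max (f i) (g i))) + ↑[max (f K) (g K)])
        = (↑((List.range K).map (fun i => min (f i) (g i)))
            + ↑((List.range K).map (fun i => max (f i) (g i))))
            + (↑[min (f K) (g K)] + ↑[max (f K) (g K)]) := by abel
      _ = (↑((List.range K).map f) + ↑((List.range K).map g)) + (↑[f K] + ↑[g K]) := by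
            rw [ih, hpair]
      _ = ↑((List.range K).map f) + ↑[f K] + (↑((List.range K).map g) + ↑[g K]) := by abel

-- ===== VERDICT (by name: the statement is the Claim_ definition above) =====
theorem get_maximum_with_k_swap_spec : Claim_equal_get_maximum_with_k_swap := by
  intro array_a array_b k _ hpre
  obtain ⟨hka, hkb⟩ := hpre
  unfold Spec_get_maximum_with_k_swap
  simp only [get_maximum_with_k_swap, get_maximum_with_k_swap_alt, PySem.List.len_eq]
  have hperm : (PySem.List.sorted array_a (fun x => x) false).Perm array_a :=
    PySem.List.sorted_perm array_a (fun x => x) false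
  have hpermB : (PySem.List.sorted array_b (fun x => x) true).Perm array_b :=
    PySem.List.sorted_perm array_b (fun x => x) true
  have hmona : ∀ p q : Nat, p ≤ q → q < (PySem.List.sorted array_a (fun x => x) false).length →
      (PySem.List.sorted array_a (fun x => x) false).getD p 0
        ≤ (PySem.List.sorted array_a (fun x => x) false).getD q 0 := by
    intro p q hpq hq
    rw [pvGetD_eq _ p (by omega), pvGetD_eq _ q hq]
    exact PySem.List.sorted_id_getElem_mono array_a hpq hq
  have hmonb : ∀ p q : Nat, p ≤ q → q < (PySem.List.sorted array_b (fun x => x) true).length →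
      (PySem.List.sorted array_b (fun x => x) true).getD q 0
        ≤ (PySem.List.sorted array_b (fun x => x) true).getD p 0 := by
    intro p q hpq hq
    rw [pvGetD_eq _ p (by omega), pvGetD_eq _ q hq]
    rcases Nat.lt_or_ge p q with hlt | hge
    · exact List.pairwise_iff_getElem.mp (PySem.List.sorted_pairwise_rev array_b (fun x => x))
        p q (by omega) hq hlt
    · have : p = q := by omega
      subst this; exact le_rfl
  set sa := PySem.List.sorted array_a (fun x => x) false with hsadef
  set sb := PySem.List.sorted array_b (fun x => x) true with hsbdef
  set sbA := PySem.List.sorted array_b (fun x => x) false with hsbAdef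
  have hla : sa.length = array_a.length := PySem.List.length_sorted array_a (fun x => x) false
  have hlb : sb.length = array_b.length := PySem.List.length_sorted array_b (fun x => x) true
  have hlbA : sbA.length = array_b.length := PySem.List.length_sorted array_b (fun x => x) false
  -- sorted descending is the reverse of sorted ascending
  have hsbA : sb.reverse = sbA := by
    apply PySem.List.eq_of_perm_of_pairwise_le_of_injective (fun x => x)
      (fun x y h => h)
    · exact (sb.reverse_perm.trans hpermB).trans
        (PySem.List.sorted_perm array_b (fun x => x) false).symm
    · exact List.pairwise_reverse.mpr (PySem.List.sorted_pairwise_rev array_b (fun x => x))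
    · exact PySem.List.sorted_pairwise array_b (fun x => x)
  by_cases hk : k ≤ 0
  · -- k ≤ 0: no loop iteration, and B pools nothing from array_b
    rw [PySem.List.pyRange_one_eq_nil hk]
    have hm : min (max k 0) ((array_b.length : Int)) = 0 := by omega
    rw [hm, sub_zero, PySem.List.slice_from_natCast]
    have hdle : sbA.drop array_b.length = [] := by
      apply List.drop_eq_nil_of_le; omega
    rw [hdle, List.append_nil]
    have hl2 : ((PySem.List.sorted array_a (fun x => x) false).length : Int)
        - (array_a.length : Int) = ((0 : Nat) : Int) := by
      rw [hla]; simp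
    rw [hl2, PySem.List.slice_from_natCast, List.drop_zero]
    simp only [List.foldl_nil]
    exact (hperm.sum_eq.trans (PySem.List.sorted_perm array_a (fun x => x) false).sum_eq.symm)
  · obtain ⟨K, hkK⟩ : ∃ K : Nat, k = (K : Int) := ⟨k.toNat, (Int.toNat_of_nonneg (by omega)).symm⟩
    subst hkK
    have hKa : K ≤ array_a.length := by exact_mod_cast hka
    have hKb : K ≤ array_b.length := by exact_mod_cast hkb
    -- ===== A side: value = sum array_a + Σ_{i<K} max 0 (sb[i] - sa[i]) =====
    have hrange : PySem.List.pyRange 0 (K : Int) 1 = (List.range K).map (fun (i : Nat) => (i : Int)) := by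
      rw [PySem.List.pyRange_one]; simp
    rw [hrange, pvLoopInv sa sb hmona K (by omega) (by omega)]
    obtain ⟨c, hc⟩ : ∃ c, pvPfx sa sb K = c := ⟨_, rfl⟩
    have hcK : c ≤ K := hc ▸ pvPfx_le sa sb K
    rw [hc]
    have hcongr : (List.range K).map (fun i => max 0 (sb.getD i 0 - sa.getD i 0))
        = (List.range K).map (fun i => if i < c then sb.getD i 0 - sa.getD i 0 else 0) := by
      apply List.map_congr_left
      intro i hi
      simp only [List.mem_range] at hi
      by_cases hic : i < c
      · have := pvPfx_lt_elem sa sb K i (hc ▸ hic)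
        rw [if_pos hic]; omega
      · have hstop : ¬ sa.getD c 0 < sb.getD c 0 := hc ▸ pvPfx_stop sa sb K (by omega)
        have h1 : sa.getD c 0 ≤ sa.getD i 0 := hmona c i (by omega) (by omega)
        have h2 : sb.getD i 0 ≤ sb.getD c 0 := hmonb c i (by omega) (by omega)
        rw [if_neg hic]; omega
    have hsplitA : (sa.take c).sum + (sa.drop c).sum = array_a.sum := by
      rw [← List.sum_append, List.take_append_drop]
      exact hperm.sum_eq
    have hA : (sb.take c ++ sa.drop c).sum
        = array_a.sum + ((List.range K).map (fun i => max 0 (sb.getD i 0 - sa.getD i 0))).sum := by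
      rw [List.sum_append, hcongr, pvSumIte _ K c hcK, pvSumDelta sa sb c (by omega) (by omega)]
      omega
    rw [hA]
    -- ===== B side =====
    have hm : min (max (K : Int) 0) ((array_b.length : Int)) = (K : Int) := by omega
    rw [hm]
    have hsub : (array_b.length : Int) - (K : Int) = ((array_b.length - K : Nat) : Int) := by
      omega
    rw [hsub, PySem.List.slice_from_natCast]
    set T := sbA.drop (array_b.length - K) with hTdef
    have hTlen : T.length = K := by rw [hTdef, List.length_drop, hlbA]; omega
    have hpoollen : ((PySem.List.sorted (array_a ++ T) (fun x => x) false).length : Int)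
        - (array_a.length : Int) = ((K : Nat) : Int) := by
      rw [PySem.List.length_sorted, List.length_append, hTlen]; push_cast; ring
    rw [hpoollen, PySem.List.slice_from_natCast]
    -- the pooled sorted list is (sorted mins) ++ (sorted (maxes ++ leftover))
    set minsL := (List.range K).map (fun i => min (sa.getD i 0) (sb.getD i 0)) with hminsdef
    set maxsL := (List.range K).map (fun i => max (sa.getD i 0) (sb.getD i 0)) with hmaxsdef
    set M := PySem.List.sorted minsL (fun x => x) false with hMdef
    set R := PySem.List.sorted (maxsL ++ sa.drop K) (fun x => x) false with hRdef
    have hT : T = (sb.take K).reverse := by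
      rw [hTdef, ← hsbA, ← hlb, List.reverse_take]
    have hpermMR : (M ++ R).Perm (array_a ++ T) := by
      rw [← Multiset.coe_eq_coe, ← Multiset.coe_add, ← Multiset.coe_add]
      have h1 : (↑minsL + ↑maxsL : Multiset Int) = ↑(sa.take K) + ↑(sb.take K) := by
        rw [Multiset.coe_add, Multiset.coe_add, Multiset.coe_eq_coe,
            ← pvMapRangeGetD sa K (by omega), ← pvMapRangeGetD sb K (by omega)]
        exact pvPairPerm (fun i => sa.getD i 0) (fun i => sb.getD i 0) K
      have h2 : (↑array_a : Multiset Int) = ↑(sa.take K) + ↑(sa.drop K) := by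
        rw [Multiset.coe_add, Multiset.coe_eq_coe]
        have hsplit := List.take_append_drop K sa
        rw [hsplit]
        exact hperm.symm
      have h3 : (↑T : Multiset Int) = ↑(sb.take K) := by
        rw [hT, Multiset.coe_reverse]
      have hM : (↑M : Multiset Int) = ↑minsL := by
        rw [Multiset.coe_eq_coe, hMdef]; exact PySem.List.sorted_perm _ _ _
      have hR : (↑R : Multiset Int) = ↑maxsL + ↑(sa.drop K) := by
        rw [Multiset.coe_add, Multiset.coe_eq_coe, hRdef]; exact PySem.List.sorted_perm _ _ _
      rw [hM, hR, h2, h3]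
      calc (↑minsL : Multiset Int) + (↑maxsL + ↑(sa.drop K))
          = (↑minsL + ↑maxsL) + ↑(sa.drop K) := by abel
        _ = (↑(sa.take K) + ↑(sb.take K)) + ↑(sa.drop K) := by rw [h1]
        _ = ↑(sa.take K) + ↑(sa.drop K) + ↑(sb.take K) := by abel
    have hpairMR : (M ++ R).Pairwise (fun x y => x ≤ y) := by
      rw [List.pairwise_append]
      refine ⟨PySem.List.sorted_pairwise minsL (fun x => x),
              PySem.List.sorted_pairwise (maxsL ++ sa.drop K) (fun x => x), ?_⟩
      intro x hx y hy
      rw [hMdef, PySem.List.mem_sorted] at hx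
      rw [hRdef, PySem.List.mem_sorted, List.mem_append] at hy
      rw [hminsdef, List.mem_map] at hx
      obtain ⟨i, hi, rfl⟩ := hx
      simp only [List.mem_range] at hi
      rcases hy with hy | hy
      · rw [hmaxsdef, List.mem_map] at hy
        obtain ⟨j, hj, rfl⟩ := hy
        simp only [List.mem_range] at hj
        rcases Nat.lt_or_ge j i with hij | hij
        · have := hmonb j i (by omega) (by omega)
          omega
        · have := hmona i j hij (by omega)
          omega
      · obtain ⟨j, hj, rfl⟩ := List.getElem_of_mem hy
        rw [List.getElem_drop]
        have hlt : K + j < sa.length := by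
          have := List.length_drop (l := sa) (i := K); omega
        rw [← pvGetD_eq sa (K + j) hlt]
        have := hmona i (K + j) (by omega) hlt
        omega
    have hspool : PySem.List.sorted (array_a ++ T) (fun x => x) false = M ++ R :=
      PySem.List.sorted_id_eq_of_perm_of_pairwise _ _ hpermMR hpairMR
    rw [hspool]
    have hMlen : M.length = K := by
      rw [hMdef, PySem.List.length_sorted, hminsdef, List.length_map, List.length_range]
    have hdropMR : (M ++ R).drop K = R := by
      rw [← hMlen, List.drop_left]
    rw [hdropMR]
    have hRsum : R.sum = maxsL.sum + (sa.drop K).sum := by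
      rw [hRdef, (PySem.List.sorted_perm _ _ _).sum_eq, List.sum_append]
    have hmaxsum : maxsL.sum
        = (sa.take K).sum + ((List.range K).map (fun i => max 0 (sb.getD i 0 - sa.getD i 0))).sum := by
      have : maxsL = (List.range K).map
          (fun i => sa.getD i 0 + max 0 (sb.getD i 0 - sa.getD i 0)) := by
        rw [hmaxsdef]
        apply List.map_congr_left
        intro i _
        omega
      rw [this, pvSumMapAdd, pvMapRangeGetD sa K (by omega)]
    have hsplit2 : (sa.take K).sum + (sa.drop K).sum = array_a.sum := by
      rw [← List.sum_append, List.take_append_drop]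
      exact hperm.sum_eq
    rw [hRsum, hmaxsum]
    omega
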